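-- pv_equiv track=rewrite | github.com/saenyakorn/2110101-COMP-PROG | 09/09_MoreDC_34.py | pattern2
-- ===== SOURCE A (Python) =====
-- def pattern2(nrows, ncols):
--     o = []
--     for i in range(nrows):
--         o.append([])
--         r = i+1
--         for j in range(ncols):
--             o[i].append(r)
--             r += nrows
--     return o
-- ===== SOURCE B (Python) =====
-- def pattern2(nrows, ncols):
--     rows = [[] for _ in range(nrows)]
--     if not rows:
--         return rows
--     for j in range(ncols):
--         base = j * nrows
--         for row, v in zip(rows, range(base + 1, base + nrows + 1)):
--             row.append(v)
--     return rows
-- ===== Notes on version B (the rewrite author's own statement) =====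
-- stated objective: alternative
-- what changed: B fills the matrix column by column — each column j is the contiguous range(j*nrows+1, j*nrows+nrows+1) zipped onto the rows — instead of A's row-by-row fill with a running accumulator stepped by nrows.
import Mathlib
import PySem

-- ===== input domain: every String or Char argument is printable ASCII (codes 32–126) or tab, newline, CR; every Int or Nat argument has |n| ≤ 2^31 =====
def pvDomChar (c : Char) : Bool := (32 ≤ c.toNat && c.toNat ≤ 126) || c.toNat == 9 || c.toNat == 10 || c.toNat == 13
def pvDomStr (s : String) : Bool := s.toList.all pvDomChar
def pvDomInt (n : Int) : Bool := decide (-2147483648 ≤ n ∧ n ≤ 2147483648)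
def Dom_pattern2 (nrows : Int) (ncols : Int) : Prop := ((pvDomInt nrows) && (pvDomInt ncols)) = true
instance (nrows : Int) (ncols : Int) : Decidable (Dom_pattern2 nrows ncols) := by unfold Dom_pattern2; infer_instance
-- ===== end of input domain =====

-- B builds the matrix column by column (each column is one contiguous range, appended
-- across a row/range zip) instead of A's row-by-row accumulator; objective: alternative.

-- ===== PORT A =====
-- A: outer loop over rows appends a fresh row, inner loop appends r and steps r by nrows.
def pattern2 (nrows : Int) (ncols : Int) : List (List Int) :=
  (PySem.List.pyRange 0 nrows 1).foldl
    (fun o i =>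
      -- o.append([]); r = i+1; inner loop appends to that last row (state = (row, r))
      let st := (PySem.List.pyRange 0 ncols 1).foldl
        (fun (st : List Int × Int) _ => (st.1 ++ [st.2], st.2 + nrows)) ([], i + 1)
      o ++ [st.1]) []

-- ===== PORT B =====
-- B: rows start empty; for each column j, zip rows with range(base+1, base+nrows+1) and append.
def pattern2_alt (nrows : Int) (ncols : Int) : List (List Int) :=
  let rows := (PySem.List.pyRange 0 nrows 1).map (fun _ => ([] : List Int))
  if rows = [] then rows else
  (PySem.List.pyRange 0 ncols 1).foldl
    (fun rows j =>
      let base := j * nrows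
      (rows.zip (PySem.List.pyRange (base + 1) (base + nrows + 1) 1)).map
        (fun rv => rv.1 ++ [rv.2]))
    rows

-- ===== PRECONDITION & SPEC =====
def Spec_pattern2 (nrows : Int) (ncols : Int) (out : List (List Int)) : Prop := out = pattern2_alt nrows ncols
instance (nrows : Int) (ncols : Int) (out : List (List Int)) : Decidable (Spec_pattern2 nrows ncols out) := by unfold Spec_pattern2; infer_instance

-- ===== CLAIM (what is proved, stated in full; the proofs are below) =====
def Claim_equal_pattern2 : Prop := ∀ (nrows : Int) (ncols : Int), Dom_pattern2 nrows ncols → Spec_pattern2 nrows ncols (pattern2 nrows ncols)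

-- ===== LEMMAS AND PROOFS =====

-- common characterisation: cell (i,j) holds (i+1) + j*nrows
def pvMat (nrows ncols : Int) : List (List Int) :=
  (List.range nrows.toNat).map
    (fun (i : Nat) => (List.range ncols.toNat).map (fun (j : Nat) => ((i : Int) + 1) + (j : Int) * nrows))

theorem pv_foldl_app {α : Type} (l : List α) (g : α → List Int) (acc : List (List Int)) :
    l.foldl (fun o i => o ++ [g i]) acc = acc ++ l.map g := by
  induction l generalizing acc with
  | nil => simp
  | cons a t ih => simp [ih]

theorem pv_innerA {α : Type} (n : Int) (l : List α) (acc : List Int) (r : Int) :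
    l.foldl (fun (st : List Int × Int) _ => (st.1 ++ [st.2], st.2 + n)) (acc, r)
      = (acc ++ (List.range l.length).map (fun (k : Nat) => r + (k : Int) * n),
         r + (l.length : Int) * n) := by
  induction l generalizing acc r with
  | nil => simp
  | cons a t ih =>
    simp only [List.foldl_cons, ih, List.length_cons]
    refine Prod.ext ?_ ?_
    · rw [List.append_assoc, List.range_succ_eq_map, List.map_cons, List.map_map]
      have hmap : List.map ((fun (k : Nat) => r + (k : Int) * n) ∘ Nat.succ) (List.range t.length)
          = List.map (fun (k : Nat) => r + n + (k : Int) * n) (List.range t.length) := by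
        apply List.map_congr_left
        intro k _
        simp only [Function.comp_apply]
        push_cast
        ring
      simp [hmap]
    · push_cast
      ring

theorem pvA_char (n c : Int) : pattern2 n c = pvMat n c := by
  unfold pattern2 pvMat
  rw [PySem.List.pyRange_one 0 n, List.foldl_map, pv_foldl_app]
  simp only [List.nil_append, Int.sub_zero]
  apply List.map_congr_left
  intro i _
  rw [pv_innerA]
  simp only [List.nil_append]
  have hl : (PySem.List.pyRange 0 c 1).length = c.toNat := by
    rw [PySem.List.length_pyRange_one]; simp
  rw [hl]
  apply List.map_congr_left
  intro k _
  ring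

theorem pvB_char (n : Int) (C : Nat) :
    (PySem.List.pyRange 0 (C : Int) 1).foldl
      (fun rows j =>
        (rows.zip (PySem.List.pyRange (j * n + 1) (j * n + n + 1) 1)).map
          (fun rv => rv.1 ++ [rv.2]))
      ((PySem.List.pyRange 0 n 1).map (fun _ => ([] : List Int)))
    = (List.range n.toNat).map
        (fun (i : Nat) => (List.range C).map (fun (j : Nat) => ((i : Int) + 1) + (j : Int) * n)) := by
  induction C with
  | zero =>
    simp only [Nat.cast_zero]
    rw [PySem.List.pyRange_one_eq_nil (le_refl 0)]
    rw [PySem.List.pyRange_one 0 n]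
    simp [List.map_map, Function.comp_def]
  | succ m ih =>
    rw [show ((m + 1 : Nat) : Int) = (m : Int) + 1 by push_cast; ring]
    rw [PySem.List.pyRange_one_succ_right (by positivity)]
    rw [List.foldl_append, ih]
    simp only [List.foldl_cons, List.foldl_nil]
    have h2 : ((m : Int) * n + n + 1) - ((m : Int) * n + 1) = n := by ring
    rw [PySem.List.pyRange_one ((m : Int) * n + 1), h2]
    rw [List.zip_map', List.map_map]
    apply List.map_congr_left
    intro i _
    simp only [Function.comp_apply]
    rw [List.range_succ, List.map_append]
    congr 1
    simp only [List.map_cons, List.map_nil]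
    congr 1
    ring

theorem pvB_eq (n c : Int) : pattern2_alt n c = pvMat n c := by
  unfold pattern2_alt
  dsimp only
  split_ifs with h
  · have hn : n.toNat = 0 := by
      have hl := congrArg List.length h
      simp [PySem.List.length_pyRange_one] at hl
      omega
    simp [h, pvMat, hn]
  · by_cases hc : 0 ≤ c
    · have hce : c = ((c.toNat : Nat) : Int) := by omega
      rw [hce]
      exact pvB_char n c.toNat
    · rw [show PySem.List.pyRange 0 c 1 = [] from PySem.List.pyRange_one_eq_nil (by omega)]
      unfold pvMat
      rw [PySem.List.pyRange_one 0 n]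
      have hc0 : c.toNat = 0 := by omega
      simp [hc0, List.map_map, Function.comp_def]

-- ===== VERDICT (by name: the statement is the Claim_ definition above) =====
theorem pattern2_spec : Claim_equal_pattern2 := by
  intro nrows ncols _
  unfold Spec_pattern2
  rw [pvA_char, pvB_eq]
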